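-- pv_equiv track=rewrite | github.com/abcdqfr/pyrust-optimizer | examples/image_processing_bottleneck.py | morphological_operations
-- ===== SOURCE A (Python) =====
-- from typing import List, Tuple, Dict
--
-- def morphological_operations(image: List[List[int]], operation: str = 'erosion') -> List[List[int]]:
--     """
--     REAL-WORLD BOTTLENECK #4: Morphological operations
--
--     Critical for:
--     - Medical image analysis (cell counting)
--     - Document processing (text cleanup)
--     - Industrial inspection
--     - Biometric systems
--
--     OPTIMIZATION OPPORTUNITIES:
--     - Structuring element operations
--     - Min/max operations across neighborhoods
--     - Multiple image passes
--     """
--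
--     height = len(image)
--     width = len(image[0])
--     result = [[0 for _ in range(width)] for _ in range(height)]
--
--     # 3x3 structuring element
--     struct_elem = [[1, 1, 1], [1, 1, 1], [1, 1, 1]]
--
--     # Apply morphological operation - NESTED LOOPS WITH MIN/MAX
--     for y in range(1, height - 1):
--         for x in range(1, width - 1):
--             if operation == 'erosion':
--                 min_value = 255
--                 # Find minimum in neighborhood
--                 for sy in range(3):
--                     for sx in range(3):
--                         if struct_elem[sy][sx]:
--                             pixel_value = image[y + sy - 1][x + sx - 1]
--                             min_value = min(min_value, pixel_value)
--                 result[y][x] = min_value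
--
--             elif operation == 'dilation':
--                 max_value = 0
--                 # Find maximum in neighborhood
--                 for sy in range(3):
--                     for sx in range(3):
--                         if struct_elem[sy][sx]:
--                             pixel_value = image[y + sy - 1][x + sx - 1]
--                             max_value = max(max_value, pixel_value)
--                 result[y][x] = max_value
--
--     return result
-- ===== SOURCE B (Python) =====
-- def morphological_operations(image, operation='erosion'):
--     height = len(image)
--     width = len(image[0])
--     zeros = [[0] * width for _ in range(height)]
--     if operation == 'erosion':
--         f, clamp = min, 255
--     elif operation == 'dilation':
--         f, clamp = max, 0
--     else:
--         return zeros
--     if height < 3 or width < 3: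
--         return zeros
--     # separable: horizontal 1D pass, then vertical 1D pass
--     H = [[f(row[x - 1], row[x], row[x + 1]) for x in range(1, width - 1)] for row in image]
--     out = [[0] * width]
--     for y in range(1, height - 1):
--         mid = [f(clamp, f(f(H[y - 1][i], H[y][i]), H[y + 1][i])) for i in range(width - 2)]
--         out.append([0] + mid + [0])
--     out.append([0] * width)
--     return out
-- ===== Notes on version B (the rewrite author's own statement) =====
-- stated objective: alternative
-- what changed: Replaces A's per-pixel 3x3 neighborhood scan (9 reads per interior pixel via nested structuring-element loops over a mutated zero grid) by a separable two-pass filter: a horizontal 3-wide min/max pass building an intermediate grid H, then a vertical 3-wide pass over H, assembling the output rows directly.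
import Mathlib
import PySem

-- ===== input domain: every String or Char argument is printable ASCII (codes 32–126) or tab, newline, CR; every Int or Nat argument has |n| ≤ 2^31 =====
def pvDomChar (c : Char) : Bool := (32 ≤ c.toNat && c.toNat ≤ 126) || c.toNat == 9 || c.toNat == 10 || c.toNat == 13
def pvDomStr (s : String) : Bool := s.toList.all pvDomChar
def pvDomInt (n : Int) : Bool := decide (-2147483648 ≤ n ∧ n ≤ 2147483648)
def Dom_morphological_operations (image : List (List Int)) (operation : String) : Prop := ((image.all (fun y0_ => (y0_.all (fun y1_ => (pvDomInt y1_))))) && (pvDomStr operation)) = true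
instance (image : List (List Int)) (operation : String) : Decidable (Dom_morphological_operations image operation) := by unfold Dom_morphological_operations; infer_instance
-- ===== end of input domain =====

-- B replaces A's 3×3 neighborhood scan per pixel by a separable two-pass filter
-- (horizontal 1D min/max pass, then vertical 1D pass over the intermediate grid),
-- building the output rows directly instead of mutating a zero grid (objective: alternative).

-- ===== PORT A =====
def morphological_operations (image : List (List Int)) (operation : String) : List (List Int) :=
  let height : Int := image.length
  let width : Int := ((image.headD []).length : Int)  -- image[0]; Pre_ excludes the empty image where Python raises
  let result : List (List Int) := List.replicate height.toNat (List.replicate width.toNat 0)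
  let struct_elem : List (List Int) := [[1, 1, 1], [1, 1, 1], [1, 1, 1]]
  (PySem.List.pyRange 1 (height - 1) 1).foldl (fun result y =>
    (PySem.List.pyRange 1 (width - 1) 1).foldl (fun result x =>
      if operation = "erosion" then
        let min_value : Int :=
          (PySem.List.pyRange 0 3 1).foldl (fun mv sy =>
            (PySem.List.pyRange 0 3 1).foldl (fun mv sx =>
              if PySem.List.pyGetD (PySem.List.pyGetD struct_elem sy []) sx 0 ≠ 0 then
                let pixel_value := PySem.List.pyGetD (PySem.List.pyGetD image (y + sy - 1) []) (x + sx - 1) 0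
                min mv pixel_value
              else mv) mv) 255
        result.modify y.toNat (fun row => row.set x.toNat min_value)
      else if operation = "dilation" then
        let max_value : Int :=
          (PySem.List.pyRange 0 3 1).foldl (fun mv sy =>
            (PySem.List.pyRange 0 3 1).foldl (fun mv sx =>
              if PySem.List.pyGetD (PySem.List.pyGetD struct_elem sy []) sx 0 ≠ 0 then
                let pixel_value := PySem.List.pyGetD (PySem.List.pyGetD image (y + sy - 1) []) (x + sx - 1) 0
                max mv pixel_value
              else mv) mv) 0
        result.modify y.toNat (fun row => row.set x.toNat max_value)
      else result) result) result

-- ===== PORT B =====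
def morphological_operations_alt (image : List (List Int)) (operation : String) : List (List Int) :=
  let height : Int := image.length
  let width : Int := ((image.headD []).length : Int)  -- image[0]; Pre_ excludes the empty image where Python raises
  let zeros : List (List Int) := List.replicate height.toNat (List.replicate width.toNat 0)
  if operation = "erosion" ∨ operation = "dilation" then
    let f : Int → Int → Int := if operation = "erosion" then min else max
    let clamp : Int := if operation = "erosion" then 255 else 0
    if height < 3 ∨ width < 3 then zeros
    else
      let H : List (List Int) := image.map (fun row =>
        (PySem.List.pyRange 1 (width - 1) 1).map (fun x =>
          f (f (PySem.List.pyGetD row (x - 1) 0) (PySem.List.pyGetD row x 0)) (PySem.List.pyGetD row (x + 1) 0)))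
      let out0 : List (List Int) := [List.replicate width.toNat 0]
      let out := (PySem.List.pyRange 1 (height - 1) 1).foldl (fun out y =>
        let mid : List Int := (PySem.List.pyRange 0 (width - 2) 1).map (fun i =>
          f clamp (f (f (PySem.List.pyGetD (PySem.List.pyGetD H (y - 1) []) i 0)
                        (PySem.List.pyGetD (PySem.List.pyGetD H y []) i 0))
                     (PySem.List.pyGetD (PySem.List.pyGetD H (y + 1) []) i 0)))
        out ++ [[0] ++ mid ++ [0]]) out0
      out ++ [List.replicate width.toNat 0]
  else zeros

-- ===== PRECONDITION & SPEC =====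
-- Pre_ excludes exactly the inputs where Python A raises IndexError: the empty image
-- (image[0] fails), and — when the loops actually read pixels (a known operation and
-- both dimensions ≥ 3) — images with a row shorter than the first row.
def Pre_morphological_operations (image : List (List Int)) (operation : String) : Prop :=
  image ≠ [] ∧
    ((operation = "erosion" ∨ operation = "dilation") ∧ 3 ≤ image.length ∧ 3 ≤ (image.headD []).length →
      ∀ row ∈ image, (image.headD []).length ≤ row.length)
instance (image : List (List Int)) (operation : String) : Decidable (Pre_morphological_operations image operation) := by unfold Pre_morphological_operations; infer_instance

def pvWitness_morphological_operations : List (List Int) × String := ([[1, 2, 3], [4, 5, 6], [7, 8, 9]], "erosion")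

def Spec_morphological_operations (image : List (List Int)) (operation : String) (out : List (List Int)) : Prop := out = morphological_operations_alt image operation
instance (image : List (List Int)) (operation : String) (out : List (List Int)) : Decidable (Spec_morphological_operations image operation out) := by unfold Spec_morphological_operations; infer_instance

-- ===== CLAIM (what is proved, stated in full; the proofs are below) =====
def Claim_equal_morphological_operations : Prop := ∀ (image : List (List Int)) (operation : String), Dom_morphological_operations image operation → Pre_morphological_operations image operation → Spec_morphological_operations image operation (morphological_operations image operation)

-- ===== LEMMAS AND PROOFS =====

lemma modify_comp {α : Type} (l : List α) (n : Nat) (f g : α → α) :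
    (l.modify n f).modify n g = l.modify n (fun a => g (f a)) := by
  rw [List.modify_modify_eq]; rfl

lemma foldl_modify_set (xs : List Int) (n : Nat) (v : Int → Int) (l : List (List Int)) :
    xs.foldl (fun res x => res.modify n (fun row => row.set x.toNat (v x))) l
      = l.modify n (fun row => xs.foldl (fun row x => row.set x.toNat (v x)) row) := by
  induction xs generalizing l with
  | nil => simp only [List.foldl_nil]; rw [show (fun (row : List Int) => row) = @id (List Int) from rfl, List.modify_id]
  | cons x xs ih =>
    simp only [List.foldl_cons]
    rw [ih, modify_comp]

lemma foldl_set_getElem? {α : Type} (v : Int → α) (n : Nat) :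
    ∀ (a b : Int), 0 ≤ a → (b - a).toNat ≤ n → ∀ (r0 : List α) (k : Nat),
    ((PySem.List.pyRange a b 1).foldl (fun r x => r.set x.toNat (v x)) r0)[k]? =
      if a ≤ (k : Int) ∧ (k : Int) < b ∧ k < r0.length then some (v (k : Int)) else r0[k]? := by
  induction n with
  | zero =>
    intro a b ha hn r0 k
    rw [PySem.List.pyRange_one_eq_nil (by omega), if_neg (by omega)]
    rfl
  | succ n ih =>
    intro a b ha hn r0 k
    by_cases hab : b ≤ a
    · rw [PySem.List.pyRange_one_eq_nil hab, if_neg (by omega)]; rfl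
    · rw [PySem.List.pyRange_one_cons (by omega), List.foldl_cons,
        ih (a+1) b (by omega) (by omega)]
      simp only [List.length_set]
      by_cases h1 : a + 1 ≤ (k : Int) ∧ (k : Int) < b ∧ k < r0.length
      · rw [if_pos h1, if_pos ⟨by omega, h1.2⟩]
      · rw [if_neg h1, List.getElem?_set]
        by_cases h2 : (k : Int) = a
        · have hk : a.toNat = k := by omega
          by_cases h3 : k < r0.length
          · rw [if_pos hk, if_pos (by omega : a.toNat < r0.length),
              if_pos ⟨by omega, by omega, h3⟩, h2]
          · rw [if_pos hk, if_neg (by omega),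
              if_neg (by rintro ⟨_, _, hc3⟩; exact h3 hc3),
              List.getElem?_eq_none (by omega)]
        · have hk : ¬ a.toNat = k := by omega
          rw [if_neg hk, if_neg (by rintro ⟨hc1, hc2, hc3⟩; exact h1 ⟨by omega, hc2, hc3⟩)]

lemma foldl_modify_getElem? {α : Type} (g : Int → α → α) (n : Nat) :
    ∀ (a b : Int), 0 ≤ a → (b - a).toNat ≤ n → ∀ (r0 : List α) (k : Nat),
    ((PySem.List.pyRange a b 1).foldl (fun r y => r.modify y.toNat (g y)) r0)[k]? =
      if a ≤ (k : Int) ∧ (k : Int) < b then (r0[k]?).map (g (k : Int)) else r0[k]? := by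
  induction n with
  | zero =>
    intro a b ha hn r0 k
    rw [PySem.List.pyRange_one_eq_nil (by omega), if_neg (by omega)]; rfl
  | succ n ih =>
    intro a b ha hn r0 k
    by_cases hab : b ≤ a
    · rw [PySem.List.pyRange_one_eq_nil hab, if_neg (by omega)]; rfl
    · rw [PySem.List.pyRange_one_cons (by omega), List.foldl_cons,
        ih (a+1) b (by omega) (by omega), List.getElem?_modify]
      cases hr : r0[k]? with
      | none => simp
      | some row =>
        simp only [Option.map_eq_map, Option.map_some]
        by_cases h1 : a + 1 ≤ (k : Int) ∧ (k : Int) < b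
        · rw [if_pos h1, if_neg (by omega : ¬ a.toNat = k),
            if_pos (show a ≤ (k : Int) ∧ (k : Int) < b from ⟨by omega, h1.2⟩)]
        · rw [if_neg h1]
          by_cases h2 : (k : Int) = a
          · rw [if_pos (by omega : a.toNat = k),
              if_pos (show a ≤ (k : Int) ∧ (k : Int) < b from ⟨by omega, by omega⟩), h2]
          · rw [if_neg (by omega : ¬ a.toNat = k),
              if_neg (show ¬ (a ≤ (k : Int) ∧ (k : Int) < b) by rintro ⟨hc1, hc2⟩; exact h1 ⟨by omega, hc2⟩)]

lemma row_core (w : Int) (hw : 3 ≤ w) (u : Int → Int) :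
    (PySem.List.pyRange 1 (w-1) 1).foldl (fun row x => row.set x.toNat (u x)) (List.replicate w.toNat (0:Int))
      = [0] ++ (PySem.List.pyRange 0 (w-2) 1).map (fun i => u (i+1)) ++ [0] := by
  have hmid : ((PySem.List.pyRange 0 (w-2) 1).map fun i => u (i+1)).length = (w-2).toNat := by
    simp [PySem.List.length_pyRange_one]
  apply List.ext_getElem?
  intro k
  rw [foldl_set_getElem? u (w-1-1).toNat 1 (w-1) (by omega) (by omega)]
  simp only [List.length_replicate, List.cons_append, List.nil_append]
  cases k with
  | zero =>
    rw [if_neg (by omega)]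
    simp [List.getElem?_replicate, (by omega : 0 < w.toNat)]
  | succ m =>
    rw [List.getElem?_cons_succ]
    by_cases h1 : (m : Int) < w - 2
    · rw [if_pos ⟨by omega, by omega, by omega⟩,
        List.getElem?_append_left (by omega : m < ((PySem.List.pyRange 0 (w-2) 1).map fun i => u (i+1)).length),
        List.getElem?_map, PySem.List.getElem?_pyRange_one]
      rw [if_pos (by omega : m < (w - 2 - 0).toNat)]
      congr 1
      congr 1
      push_cast
      ring
    · by_cases h2 : (m : Int) = w - 2
      · rw [if_neg (by omega),
          List.getElem?_append_right (by omega : ((PySem.List.pyRange 0 (w-2) 1).map fun i => u (i+1)).length ≤ m)]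
        simp [List.getElem?_replicate, hmid, (by omega : m + 1 < w.toNat), (by omega : m - (w-2).toNat = 0)]
      · rw [if_neg (by omega), List.getElem?_eq_none (by simp; omega),
          List.getElem?_eq_none (by simp [hmid]; omega)]

lemma main_core (h w : Int) (hh : 3 ≤ h) (hw : 3 ≤ w) (vA vB : Int → Int → Int)
    (hv : ∀ y x, 1 ≤ y → y < h - 1 → 1 ≤ x → x < w - 1 → vA y x = vB y (x - 1)) :
    (PySem.List.pyRange 1 (h-1) 1).foldl (fun result y =>
        (PySem.List.pyRange 1 (w-1) 1).foldl (fun result x =>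
          result.modify y.toNat (fun row => row.set x.toNat (vA y x))) result)
      (List.replicate h.toNat (List.replicate w.toNat 0))
    = [List.replicate w.toNat 0]
      ++ (PySem.List.pyRange 1 (h-1) 1).map (fun y =>
            [0] ++ (PySem.List.pyRange 0 (w-2) 1).map (fun i => vB y i) ++ [0])
      ++ [List.replicate w.toNat 0] := by
  have hstep : (fun (result : List (List Int)) (y : Int) =>
        (PySem.List.pyRange 1 (w-1) 1).foldl (fun result x =>
          result.modify y.toNat (fun row => row.set x.toNat (vA y x))) result)
      = (fun result y => result.modify y.toNat
          (fun row => (PySem.List.pyRange 1 (w-1) 1).foldl (fun row x => row.set x.toNat (vA y x)) row)) := by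
    funext result y
    exact foldl_modify_set _ _ _ _
  rw [hstep]
  apply List.ext_getElem?
  intro k
  rw [foldl_modify_getElem? _ (h-1-1).toNat 1 (h-1) (by omega) (by omega)]
  simp only [List.cons_append, List.nil_append]
  set M := (PySem.List.pyRange 1 (h-1) 1).map
      (fun y => (0:Int) :: (((PySem.List.pyRange 0 (w-2) 1).map (fun i => vB y i)) ++ [0])) with hM
  have hmapl : M.length = (h-2).toNat := by
    rw [hM]; simp [PySem.List.length_pyRange_one]; omega
  cases k with
  | zero =>
    rw [if_neg (by omega)]
    simp [(by omega : 0 < h.toNat)]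
  | succ m =>
    rw [List.getElem?_cons_succ]
    by_cases h1 : (m : Int) < h - 2
    · rw [if_pos ⟨by omega, by omega⟩,
        List.getElem?_append_left (by omega : m < M.length), hM,
        List.getElem?_map, PySem.List.getElem?_pyRange_one,
        if_pos (by omega : m < (h - 1 - 1).toNat),
        List.getElem?_replicate, if_pos (by omega : m + 1 < h.toNat)]
      simp only [Option.map_some, Option.some.injEq]
      rw [row_core w hw (vA (m+1 : Nat))]
      simp only [List.cons_append, List.nil_append, List.cons.injEq, true_and]
      rw [List.append_cancel_right_eq]
      apply List.map_congr_left
      intro i hi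
      rw [PySem.List.mem_pyRange_one] at hi
      rw [hv _ _ (by omega) (by omega) (by omega) (by omega)]
      congr 1 <;> omega
    · by_cases h2 : (m : Int) = h - 2
      · rw [if_neg (by omega),
          List.getElem?_append_right (by omega : M.length ≤ m)]
        simp [List.getElem?_replicate, hmapl, (by omega : m + 1 < h.toNat), (by omega : m - (h - 2).toNat = 0)]
      · rw [if_neg (by omega), List.getElem?_eq_none (by simp; omega),
          List.getElem?_eq_none (by simp [hmapl]; omega)]

lemma fold3x3 (f : Int → Int → Int) (image : List (List Int)) (init y x : Int) :
    (PySem.List.pyRange 0 3 1).foldl (fun mv sy =>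
      (PySem.List.pyRange 0 3 1).foldl (fun mv sx =>
        if PySem.List.pyGetD (PySem.List.pyGetD [[(1:Int),1,1],[1,1,1],[1,1,1]] sy []) sx 0 ≠ 0 then
          f mv (PySem.List.pyGetD (PySem.List.pyGetD image (y + sy - 1) []) (x + sx - 1) 0)
        else mv) mv) init
    = f (f (f (f (f (f (f (f (f init
        (PySem.List.pyGetD (PySem.List.pyGetD image (y + 0 - 1) []) (x + 0 - 1) 0))
        (PySem.List.pyGetD (PySem.List.pyGetD image (y + 0 - 1) []) (x + 1 - 1) 0))
        (PySem.List.pyGetD (PySem.List.pyGetD image (y + 0 - 1) []) (x + 2 - 1) 0))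
        (PySem.List.pyGetD (PySem.List.pyGetD image (y + 1 - 1) []) (x + 0 - 1) 0))
        (PySem.List.pyGetD (PySem.List.pyGetD image (y + 1 - 1) []) (x + 1 - 1) 0))
        (PySem.List.pyGetD (PySem.List.pyGetD image (y + 1 - 1) []) (x + 2 - 1) 0))
        (PySem.List.pyGetD (PySem.List.pyGetD image (y + 2 - 1) []) (x + 0 - 1) 0))
        (PySem.List.pyGetD (PySem.List.pyGetD image (y + 2 - 1) []) (x + 1 - 1) 0))
        (PySem.List.pyGetD (PySem.List.pyGetD image (y + 2 - 1) []) (x + 2 - 1) 0) := by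
  rfl

lemma chain9 (f : Int → Int → Int) (hc : Std.Commutative f) (ha : Std.Associative f)
    (c a1 a2 a3 a4 a5 a6 a7 a8 a9 : Int) :
    f (f (f (f (f (f (f (f (f c a1) a2) a3) a4) a5) a6) a7) a8) a9
      = f c (f (f (f (f a1 a2) a3) (f (f a4 a5) a6)) (f (f a7 a8) a9)) := by
  ac_rfl

def AForm (image : List (List Int)) (f : Int → Int → Int) (clamp : Int) : List (List Int) :=
  (PySem.List.pyRange 1 ((image.length : Int) - 1) 1).foldl (fun result y =>
    (PySem.List.pyRange 1 (((image.headD []).length : Int) - 1) 1).foldl (fun result x =>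
      result.modify y.toNat (fun row => row.set x.toNat (
        (PySem.List.pyRange 0 3 1).foldl (fun mv sy =>
          (PySem.List.pyRange 0 3 1).foldl (fun mv sx =>
            if PySem.List.pyGetD (PySem.List.pyGetD [[(1:Int),1,1],[1,1,1],[1,1,1]] sy []) sx 0 ≠ 0 then
              f mv (PySem.List.pyGetD (PySem.List.pyGetD image (y + sy - 1) []) (x + sx - 1) 0)
            else mv) mv) clamp))) result)
    (List.replicate image.length (List.replicate (image.headD []).length 0))

def BForm (image : List (List Int)) (f : Int → Int → Int) (clamp : Int) : List (List Int) :=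
  let w : Int := ((image.headD []).length : Int)
  let H : List (List Int) := image.map (fun row =>
    (PySem.List.pyRange 1 (w - 1) 1).map (fun x =>
      f (f (PySem.List.pyGetD row (x - 1) 0) (PySem.List.pyGetD row x 0)) (PySem.List.pyGetD row (x + 1) 0)))
  [List.replicate (image.headD []).length (0:Int)]
  ++ (PySem.List.pyRange 1 ((image.length : Int) - 1) 1).map (fun y =>
       [0] ++ (PySem.List.pyRange 0 (w - 2) 1).map (fun i =>
         f clamp (f (f (PySem.List.pyGetD (PySem.List.pyGetD H (y - 1) []) i 0)
                       (PySem.List.pyGetD (PySem.List.pyGetD H y []) i 0))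
                    (PySem.List.pyGetD (PySem.List.pyGetD H (y + 1) []) i 0))) ++ [0])
  ++ [List.replicate (image.headD []).length 0]

lemma H_at (f : Int → Int → Int) (image : List (List Int)) (w r i : Int)
    (hr0 : 0 ≤ r) (hr : r < (image.length : Int)) (hi0 : 0 ≤ i) (hi : i < w - 2) :
    PySem.List.pyGetD (PySem.List.pyGetD (image.map (fun row =>
        (PySem.List.pyRange 1 (w - 1) 1).map (fun x =>
          f (f (PySem.List.pyGetD row (x - 1) 0) (PySem.List.pyGetD row x 0)) (PySem.List.pyGetD row (x + 1) 0)))) r []) i 0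
    = f (f (PySem.List.pyGetD (PySem.List.pyGetD image r []) i 0)
           (PySem.List.pyGetD (PySem.List.pyGetD image r []) (i + 1) 0))
        (PySem.List.pyGetD (PySem.List.pyGetD image r []) (i + 2) 0) := by
  rw [PySem.List.pyGetD_eq_getElem _ _ hr0 (by simp; omega)]
  simp only [List.getElem_map]
  rw [show i = ((i.toNat : Int)) from (Int.toNat_of_nonneg hi0).symm]
  rw [PySem.List.pyGetD_map_pyRange_one _ 1 _ _ 0 (by omega)]
  rw [show (1:Int) + (i.toNat : Int) - 1 = (i.toNat : Int) from by omega,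
      show (1:Int) + (i.toNat : Int) = (i.toNat : Int) + 1 from by omega,
      show ((i.toNat : Int)) + 1 + 1 = (i.toNat : Int) + 2 from by omega]
  rw [PySem.List.pyGetD_eq_getElem _ _ hr0 hr]

lemma case_op (image : List (List Int)) (f : Int → Int → Int) (clamp : Int)
    (hc : Std.Commutative f) (ha : Std.Associative f)
    (h3 : 3 ≤ (image.length : Int)) (w3 : 3 ≤ ((image.headD []).length : Int)) :
    AForm image f clamp = BForm image f clamp := by
  have hv : ∀ y x, 1 ≤ y → y < (image.length : Int) - 1 → 1 ≤ x → x < ((image.headD []).length : Int) - 1 →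
      (fun y x => (PySem.List.pyRange 0 3 1).foldl (fun mv sy =>
          (PySem.List.pyRange 0 3 1).foldl (fun mv sx =>
            if PySem.List.pyGetD (PySem.List.pyGetD [[(1:Int),1,1],[1,1,1],[1,1,1]] sy []) sx 0 ≠ 0 then
              f mv (PySem.List.pyGetD (PySem.List.pyGetD image (y + sy - 1) []) (x + sx - 1) 0)
            else mv) mv) clamp) y x
      = (fun y i =>
         f clamp (f (f (PySem.List.pyGetD (PySem.List.pyGetD (image.map (fun row =>
              (PySem.List.pyRange 1 (((image.headD []).length : Int) - 1) 1).map (fun x =>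
                f (f (PySem.List.pyGetD row (x - 1) 0) (PySem.List.pyGetD row x 0)) (PySem.List.pyGetD row (x + 1) 0)))) (y - 1) []) i 0)
                       (PySem.List.pyGetD (PySem.List.pyGetD (image.map (fun row =>
              (PySem.List.pyRange 1 (((image.headD []).length : Int) - 1) 1).map (fun x =>
                f (f (PySem.List.pyGetD row (x - 1) 0) (PySem.List.pyGetD row x 0)) (PySem.List.pyGetD row (x + 1) 0)))) y []) i 0))
                    (PySem.List.pyGetD (PySem.List.pyGetD (image.map (fun row =>
              (PySem.List.pyRange 1 (((image.headD []).length : Int) - 1) 1).map (fun x =>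
                f (f (PySem.List.pyGetD row (x - 1) 0) (PySem.List.pyGetD row x 0)) (PySem.List.pyGetD row (x + 1) 0)))) (y + 1) []) i 0))) y (x - 1) := by
    intro y x hy1 hy2 hx1 hx2
    simp only
    rw [fold3x3 f image clamp y x, chain9 f hc ha]
    rw [H_at f image _ (y - 1) (x - 1) (by omega) (by omega) (by omega) (by omega),
        H_at f image _ y (x - 1) (by omega) (by omega) (by omega) (by omega),
        H_at f image _ (y + 1) (x - 1) (by omega) (by omega) (by omega) (by omega)]
    rw [show y + 0 - 1 = y - 1 from by ring, show y + 1 - 1 = y from by ring,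
        show y + 2 - 1 = y + 1 from by ring, show x + 0 - 1 = x - 1 from by ring,
        show x + 1 - 1 = x from by ring, show x + 2 - 1 = x + 1 from by ring,
        show x - 1 + 1 = x from by ring, show x - 1 + 2 = x + 1 from by ring]
  exact main_core ((image.length : Int)) (((image.headD []).length : Int)) h3 w3 _ _ hv

lemma foldl_id {α β : Type} (l : List β) (a : α) : l.foldl (fun acc _ => acc) a = a := by
  induction l generalizing a with
  | nil => rfl
  | cons x xs ih => exact ih a

def zerosOf (image : List (List Int)) : List (List Int) :=
  List.replicate image.length (List.replicate (image.headD []).length 0)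

lemma A_ero (image : List (List Int)) :
    morphological_operations image "erosion" = AForm image min 255 := rfl

lemma A_dil (image : List (List Int)) :
    morphological_operations image "dilation" = AForm image max 0 := rfl

lemma A_other (image : List (List Int)) (op : String) (he : ¬ op = "erosion") (hd : ¬ op = "dilation") :
    morphological_operations image op = zerosOf image := by
  simp only [morphological_operations, if_neg he, if_neg hd]
  simp only [foldl_id]
  rfl

lemma A_small (image : List (List Int)) (op : String)
    (hs : (image.length : Int) < 3 ∨ ((image.headD []).length : Int) < 3) :
    morphological_operations image op = zerosOf image := by
  simp only [morphological_operations]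
  rcases hs with hs | hs
  · rw [PySem.List.pyRange_one_eq_nil (a := 1) (b := (image.length : Int) - 1) (by omega)]
    rfl
  · rw [PySem.List.pyRange_one_eq_nil (a := 1) (b := ((image.headD []).length : Int) - 1) (by omega)]
    simp only [List.foldl_nil]
    exact foldl_id _ _

lemma B_other (image : List (List Int)) (op : String)
    (hop : ¬ (op = "erosion" ∨ op = "dilation")) :
    morphological_operations_alt image op = zerosOf image := by
  simp only [morphological_operations_alt]
  rw [if_neg hop]
  rfl

lemma B_small (image : List (List Int)) (op : String) (hop : op = "erosion" ∨ op = "dilation")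
    (hs : (image.length : Int) < 3 ∨ ((image.headD []).length : Int) < 3) :
    morphological_operations_alt image op = zerosOf image := by
  simp only [morphological_operations_alt]
  rw [if_pos hop, if_pos hs]
  rfl

lemma B_ero (image : List (List Int)) (h3 : 3 ≤ (image.length : Int))
    (w3 : 3 ≤ ((image.headD []).length : Int)) :
    morphological_operations_alt image "erosion" = BForm image min 255 := by
  simp only [morphological_operations_alt, reduceIte]
  rw [if_neg (show ¬ ((image.length : Int) < 3 ∨ ((image.headD []).length : Int) < 3) by omega)]
  rw [PySem.List.foldl_append_singleton_eq_map]
  rw [List.append_assoc]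
  rfl

lemma B_dil (image : List (List Int)) (h3 : 3 ≤ (image.length : Int))
    (w3 : 3 ≤ ((image.headD []).length : Int)) :
    morphological_operations_alt image "dilation" = BForm image max 0 := by
  simp only [morphological_operations_alt, reduceIte]
  rw [if_neg (show ¬ ((image.length : Int) < 3 ∨ ((image.headD []).length : Int) < 3) by omega)]
  rw [PySem.List.foldl_append_singleton_eq_map]
  rw [List.append_assoc]
  rfl

-- ===== VERDICT (by name: the statement is the Claim_ definition above) =====
theorem morphological_operations_spec : Claim_equal_morphological_operations := by
  intro image operation hdom hpre
  unfold Spec_morphological_operations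
  by_cases he : operation = "erosion"
  · subst he
    by_cases hs : (image.length : Int) < 3 ∨ ((image.headD []).length : Int) < 3
    · rw [A_small image _ hs, B_small image _ (Or.inl rfl) hs]
    · rw [A_ero, B_ero image (by omega) (by omega),
        case_op image min 255 ⟨min_comm⟩ ⟨min_assoc⟩ (by omega) (by omega)]
  · by_cases hd : operation = "dilation"
    · subst hd
      by_cases hs : (image.length : Int) < 3 ∨ ((image.headD []).length : Int) < 3
      · rw [A_small image _ hs, B_small image _ (Or.inr rfl) hs]
      · rw [A_dil, B_dil image (by omega) (by omega),
          case_op image max 0 ⟨max_comm⟩ ⟨max_assoc⟩ (by omega) (by omega)]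
    · rw [A_other image operation he hd, B_other image operation (by tauto)]
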